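/- GENERATED by mk_final_copies.py from the proof of the farm's unit `decode_residue.2` (farm:decode_residue.2.1: Lemmas.lean) as the
   re-elaboration sweep compiled it — do not edit. -/
import Asan.CheckWalk
import Vorbis.Spec.Units.decode_residue_2

open X86 X86.User Asan Vorbis Vorbis.Spec Vorbis.Spec.DecodeResidue

set_option maxRecDepth 4000
set_option maxHeartbeats 4000000

namespace Vorbis.Spec.decode_residue_2

/-- **A window that one round of loop 2152 stores to**: a part of the own frame's stack below the steady stack pointer (the
return addresses of the check calls and of `memset`, `memset`'s own frame), or a part of one of the decoder's channel buffers
(what `memset` zeroes). -/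
def RoundWin (g : G) (w : Span) : Prop :=
  (g.RA - 848 ≤ w.lo ∧ w.hi ≤ g.RA - 248) ∨
  (∃ c : Nat, c < g.C ∧ stb_vorbis.channel_buffers g.e.mem g.f c ≤ w.lo ∧
    w.hi ≤ stb_vorbis.channel_buffers g.e.mem g.f c + 4 * bsize g.e.mem g.f 1)

/-- **What a `RoundWin` misses and where it lies**: inside a span of the contract's footprint; off `*f`; off the temp block;
off the steady part of the own frame `[RA − 248, RA)`. -/
theorem roundWin_facts {u₀ : State} {g : G} {v : State} (he : Entered u₀ g) (c : Common u₀ g v) {w : Span}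
    (hw : RoundWin g w) :
    (∀ a : Nat, w.lo ≤ a → a < w.hi → ∃ w', w' ∈ g.spec.footprint g.e ∧ w'.lo ≤ a ∧ a < w'.hi) ∧
    (w.hi ≤ g.f ∨ g.f + 1808 ≤ w.lo) ∧
    (w.hi ≤ g.TB.base ∨ g.TB.base + g.TB.size ≤ w.lo) ∧
    (w.hi ≤ g.RA - 248 ∨ g.RA ≤ w.lo) := by
  have hpre := he.pre
  have hok := hpre.env.ok
  have hroom := he.room
  have hob : g.Blk (objBlock g.f) := hpre.vorbis.obj
  have hobst := hpre.free.offStack _ hob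
  simp only [vblock, voff] at hobst
  -- the temp block: inside the free part of the arena, off the stack
  have hbusy : ADOBusy g.A' g.others' v.mem g.f g.sz := c.point.busy
  have htr := hbusy.ok.tblock_range c.tblock
  have htoff := hbusy.ok.tblock_off c.tblock
  have h2 := hbusy.ok.AR2
  have hl8 := le_r8 g.TB.size
  unfold G.A' at htr h2
  simp only [varena] at htr h2
  have eR : (g.e.reg .rsp).toNat = g.RA := rfl
  have ef : (g.e.reg .rdi).toNat = g.f := rfl
  rcases hw with ⟨h1, h2'⟩ | ⟨k, hk, h1, h2'⟩
  · -- the stack below the steady stack pointer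
    refine ⟨?_, ?_, ?_, ?_⟩
    · intro a ha1 ha2
      refine ⟨⟨(g.e.reg .rsp).toNat - 848, (g.e.reg .rsp).toNat⟩, ?_, ?_, ?_⟩
      · unfold Spec.footprint
        exact List.mem_cons_self
      · show (g.e.reg .rsp).toNat - 848 ≤ a
        omega
      · show a < (g.e.reg .rsp).toNat
        omega
    · omega
    · omega
    · omega
  · -- a channel buffer
    have hk' : k < nchan g.e.mem g.f := hk
    have hkint : (k : Int) < stb_vorbis.channels g.e.mem g.f := by
      rw [nchan_def] at hk'
      omega
    have hC : SampleBuf g.Blk g.e.mem g.f ⟨stb_vorbis.channel_buffers g.e.mem g.f k, 4 * bsize g.e.mem g.f 1⟩ :=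
      SampleBuf.chan k hkint
    have hB : g.Blk ⟨stb_vorbis.channel_buffers g.e.mem g.f k, 4 * bsize g.e.mem g.f 1⟩ :=
      SampleBuf.blk he.vorbis.config hC
    have hst := hpre.free.offStack _ hB
    have hgap := hpre.free.offGap _ hB
    have hd := hpre.sep.bufobj _ hC
    simp only [vblock, voff] at hd
    simp only [] at hst hgap
    refine ⟨?_, ?_, ?_, ?_⟩
    · intro a ha1 ha2
      refine ⟨⟨stb_vorbis.channel_buffers g.e.mem g.f k,
        stb_vorbis.channel_buffers g.e.mem g.f k + 4 * bsize g.e.mem g.f 1⟩, ?_, ?_, ?_⟩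
      · unfold Spec.footprint
        apply List.mem_cons_of_mem
        show _ ∈ DecodeResidue.writes g.A g.e
        unfold DecodeResidue.writes
        apply List.mem_append_right
        exact List.mem_map.mpr ⟨k, List.mem_range.mpr hk', rfl⟩
      · show stb_vorbis.channel_buffers g.e.mem g.f k ≤ a
        omega
      · show a < stb_vorbis.channel_buffers g.e.mem g.f k + 4 * bsize g.e.mem g.f 1
        omega
    · omega
    · omega
    · omega

/-- **A read inside the steady part of the own frame** `[RA − 248, RA)` (the saved registers, the spill slots) is kept by a
round's stores. -/
theorem slot_frame {u₀ : State} {g : G} {v : State} (he : Entered u₀ g) (c : Common u₀ g v) {ws : List Span} {m : Mem}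
    (hs : Mem.SameExcept ws v.mem m) (hws : ∀ w, w ∈ ws → RoundWin g w) (a : Word) (n : Nat)
    (h1 : g.RA - 248 ≤ a.toNat) (h2 : a.toNat + n ≤ g.RA) : m.readLE a n = v.mem.readLE a n := by
  have hroom := he.room
  apply hs.readLE a n (by omega)
  intro w hw
  have h := (roundWin_facts he c (hws w hw)).2.2.2
  omega

/-- **`*f` reads the same after a round's stores**, on any list of windows below 1808. -/
theorem objEq_round {u₀ : State} {g : G} {v : State} (he : Entered u₀ g) (c : Common u₀ g v) {ws : List Span} {m : Mem}
    (hs : Mem.SameExcept ws v.mem m) (hws : ∀ w, w ∈ ws → RoundWin g w) (wins : Wins) (hbelow : WinsBelow wins 1808) :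
    ObjEq wins v.mem g.f m g.f := by
  have hob : g.Blk (objBlock g.f) := he.pre.vorbis.obj
  have hobin := he.pre.env.ok.inside _ hob
  simp only [vblock, voff] at hobin
  apply ObjEq.of_sameExcept hs
  · intro w hw
    have := hbelow w hw
    omega
  · intro w hw s hsp
    have hb := hbelow w hw
    have h := (roundWin_facts he c (hws s hsp)).2.1
    omega

/-- **COMMON after the stores of one round of loop 2152** (`ws`: return addresses and `memset`'s frame below the steady stack
pointer, the zeroed part of a channel buffer): the frame slots are above the stack windows and off the buffers; `*f` and the
row-pointer table of the temp block are not met; no shadow byte was written. -/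
theorem common_frame {u₀ : State} {g : G} {v s : State} (he : Entered u₀ g) (c : Common u₀ g v) {ws : List Span}
    (hs : Mem.SameExcept ws v.mem s.mem) (hws : ∀ w, w ∈ ws → RoundWin g w)
    (hun : ShadowUntouched v.mem s.mem)
    (rbp : s.reg .rbp = g.e.reg .rsp - 8) (rsp : s.reg .rsp = g.e.reg .rsp - 248)
    (code : CodeOK u₀ s.mem) (inv : abiInv s) : Common u₀ g s := by
  have hroom := he.room
  have eR : (g.e.reg .rsp).toNat = g.RA := rfl
  have hsl := slot_frame he c hs hws
  have hob : g.Blk (objBlock g.f) := he.pre.vorbis.obj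
  have hobin := he.pre.env.ok.inside _ hob
  simp only [vblock, voff] at hobin
  apply Common.of_frame he rbp rsp code inv
  · rw [hsl _ 8 (by u_omega) (by u_omega)]
    exact c.s_rbp
  · rw [hsl _ 8 (by u_omega) (by u_omega)]
    exact c.s_r15
  · rw [hsl _ 8 (by u_omega) (by u_omega)]
    exact c.s_r14
  · rw [hsl _ 8 (by u_omega) (by u_omega)]
    exact c.s_r13
  · rw [hsl _ 8 (by u_omega) (by u_omega)]
    exact c.s_r12
  · rw [hsl _ 8 (by u_omega) (by u_omega)]
    exact c.s_rbx
  · rw [hsl _ 8 (by u_omega) (by u_omega)]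
    exact c.fr_f
  · rw [hsl _ 8 (by u_omega) (by u_omega)]
    exact c.fr_rb
  · rw [hsl _ 4 (by u_omega) (by u_omega)]
    exact c.fr_ch
  · rw [hsl _ 4 (by u_omega) (by u_omega)]
    exact c.fr_prd
  · rw [hsl _ 4 (by u_omega) (by u_omega)]
    exact c.fr_w
  · rw [hsl _ 4 (by u_omega) (by u_omega)]
    exact c.fr_rtype
  · rw [hsl _ 8 (by u_omega) (by u_omega)]
    exact c.fr_pcd
  · rw [hsl _ 8 (by u_omega) (by u_omega)]
    exact c.fr_si
  · -- the footprint
    exact c.same.step_same hs (fun w hw => (roundWin_facts he c (hws w hw)).1)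
  · -- the shadow layer
    exact c.shadow.untouched hun
  · -- `Bits`: `*f` is not met
    exact c.point.vorbis.bits.frame (objEq_round he c hs hws objWins (by decide))
  · -- `ADOBusy`
    have hb : ADOBusy g.A' g.others' v.mem g.f g.sz := c.point.busy
    exact hb.transfer (objEq_round he c hs hws ADO.wins (by decide))
  · -- TB: the row-pointer table is not met
    apply c.tb.frame
    have hsz := c.tb.size
    have h3 : g.C * (8 + 8 * g.PRD) = g.C * 8 + g.C * (8 * g.PRD) := Nat.mul_add _ _ _
    have hbusy : ADOBusy g.A' g.others' v.mem g.f g.sz := c.point.busy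
    have htoff := hbusy.ok.tblock_off c.tblock
    apply Block.Kept.of_sameExcept hs
    · intro w hw
      have h := (roundWin_facts he c (hws w hw)).2.2.1
      show g.TB.base + 8 * g.C ≤ w.lo ∨ w.hi ≤ g.TB.base
      omega
    · show g.TB.base + 8 * g.C ≤ 2 ^ 64
      omega
  · -- μ
    rw [mu_transfer (objEq_round he c hs hws muWins (by decide))]
    exact c.mu_le

/-! ### 32-bit loop counters as numbers -/

/-- The low half of a small number, as a number. -/
theorem part32_ofNat_toNat (i : Nat) (h : i < 2 ^ 31) : (Word.part .w32 (UInt64.ofNat i)).toNat = i := by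
  rw [Asan.part32_toNat, UInt64.toNat_ofNat']
  omega

/-- The low half of a small number, as a signed number (the form of a branch hypothesis after `cmp r32, r32`). -/
theorem part32_ofNat_toInt (i : Nat) (h : i < 2 ^ 31) : (Word.part .w32 (UInt64.ofNat i)).toInt = (i : Int) := by
  have e := part32_ofNat_toNat i h
  rw [BitVec.toInt_eq_toNat_cond, e]
  simp only [Width.bits]
  split <;> omega

/-- `movsxd` of a small non-negative `int` is the number itself. -/
theorem sext_ofNat (i : Nat) (h : i < 2 ^ 31) :
    Word.ofBV (BitVec.signExtend 64 (Word.part .w32 (UInt64.ofNat i))) = UInt64.ofNat i := by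
  apply UInt64.toNat_inj.mp
  rw [toNat_sext32 _ (by rw [part32_ofNat_toNat i h]; exact h), part32_ofNat_toNat i h, UInt64.toNat_ofNat']
  omega

/-- `movsxd` of a small non-negative `int` loaded from a 4-byte slot. -/
theorem sext_ofNat32 (n : Nat) (h : n < 2 ^ 31) :
    Word.ofBV (BitVec.signExtend 64 (BitVec.ofNat 32 n)) = UInt64.ofNat n := by
  apply UInt64.toNat_inj.mp
  have e : (BitVec.ofNat 32 n).toNat = n := by
    rw [BitVec.toNat_ofNat]
    omega
  rw [toNat_sext32 _ (by rw [e]; exact h), e, UInt64.toNat_ofNat']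
  omega

/-- **`0 ≤ ch ≤ 16`** (P2 + HD1): the loop counter and its bound are small non-negative `int`s. -/
theorem ch_le16 {u₀ : State} {g : G} (he : Entered u₀ g) : g.ch ≤ 16 := by
  have h1 := he.args.ch_le
  have h2 := he.vorbis.config.header.HD1.2
  rw [nchan_def] at h1
  omega

/-- A range that was live at the function's entry is live inside it: the own frame's objects and the temp block were added. -/
theorem live_inner (g : G) {a n : Nat} (h : LiveIn g.others g.frames a n) : LiveIn g.others' g.frames' a n := by
  apply h.mono
  intro o ho
  unfold G.frames' G.others'
  rw [stackObjs_cons]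
  rcases List.mem_append.mp ho with h | h
  · exact List.mem_append_left _ (List.mem_append_right _ h)
  · exact List.mem_append_right _ (List.mem_cons_of_mem _ h)


/-- `add ebx, 1` on a small counter. -/
theorem counter_succ32 (i : Nat) (h : i < 2 ^ 31) :
    Word.ofBV (Word.part .w32 (UInt64.ofNat i) + 1#32) = UInt64.ofNat (i + 1) := by
  apply UInt64.toNat_inj.mp
  have e1 : (1#32).toNat = 1 := by decide
  rw [toNat_ofBV32, BitVec.toNat_add, part32_ofNat_toNat i h, e1, UInt64.toNat_ofNat']
  omega

/-- `movsxd rdx, n ; shl rdx, 2` is `4·n` for `n ≤ 4096`. -/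
theorem shl2_n (n : Nat) (h : n ≤ 4096) :
    (Word.ofBV (BitVec.signExtend 64 (BitVec.ofNat 32 n)) <<< 2).toNat = 4 * n := by
  rw [sext_ofNat32 n (by omega)]
  have e2 : (2 : UInt64).toNat = 2 := rfl
  rw [UInt64.toNat_shiftLeft, UInt64.toNat_ofNat', e2]
  have e : n % 2 ^ 64 = n := Nat.mod_eq_of_lt (by omega)
  rw [e, Nat.shiftLeft_eq]
  have e4 : 2 ^ (2 % 64) = 4 := by decide
  rw [e4]
  omega

/-- **`32 ≤ n ≤ 4096`** (P1 + HD3): `2·n ≤ blocksize_1 ≤ 8192`. -/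
theorem n_le4096 {u₀ : State} {g : G} (he : Entered u₀ g) : g.n ≤ 4096 := by
  have h1 := he.args.n_le
  have h2 := he.vorbis.hd3.b1.facts.2.2
  omega

/-- **`do_not_decode[i]`, read through the pushed return address of the check call**, is the flag of the entry memory: the
caller's array lies at or above the caller's stack pointer, and is never written (`Common.dnd_same`). -/
theorem dnd_read {u₀ : State} {g : G} {v : State} (he : Entered u₀ g) (c : Common u₀ g v) {i : Nat} (hi : i < g.ch)
    (x : Nat) :
    (v.mem.writeLE (g.e.reg .rsp - 256) 8 x).readLE (g.e.reg .r9 + UInt64.ofNat i) 1 = g.e.mem.u8 (g.dnd + i) := by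
  have hroom := he.room
  have hst := he.args.dnd_stack
  have eR : (g.e.reg .rsp).toNat = g.RA := rfl
  have eD : (g.e.reg .r9).toNat = g.dnd := rfl
  have ea : g.e.reg .r9 + UInt64.ofNat i = addr (g.dnd + i) := by
    rw [← addr_toNat (g.e.reg .r9)]
    exact addr_add_addr _ _
  have e : (addr (g.dnd + i)).toNat = g.dnd + i := toNat_addr _ (by omega)
  rw [ea, Mem.readLE_writeLE_disjoint_noWrap _ _ _ _ _ _ (by unfold Mem.NoWrap; u_omega) (by unfold Mem.NoWrap; omega)
    (by right; rw [e]; u_omega)]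
  exact c.dnd_same i hi

/-- **`residue_buffers[i]`, read through the pushed return address of the check call**, is the pointer of the entry memory. -/
theorem rb_read {u₀ : State} {g : G} {v : State} (he : Entered u₀ g) (c : Common u₀ g v) {i : Nat} (hi : i < g.ch)
    (x : Nat) :
    (v.mem.writeLE (g.e.reg .rsp - 256) 8 x).readLE (g.e.reg .rsi + UInt64.ofNat i * 8) 8 =
      g.e.mem.ptr (g.rb + 8 * i) := by
  have hroom := he.room
  have hst := he.args.rb_stack
  have h16 := ch_le16 he
  have eR : (g.e.reg .rsp).toNat = g.RA := rfl
  have eD : (g.e.reg .rsi).toNat = g.rb := rfl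
  have ea : g.e.reg .rsi + UInt64.ofNat i * 8 = addr (g.rb + 8 * i) := by
    apply UInt64.toNat_inj.mp
    have e8 : (8 : UInt64).toNat = 8 := rfl
    rw [toNat_addr _ (by omega), UInt64.toNat_add, UInt64.toNat_mul, UInt64.toNat_ofNat', e8]
    omega
  have e : (addr (g.rb + 8 * i)).toNat = g.rb + 8 * i := toNat_addr _ (by omega)
  rw [ea, Mem.readLE_writeLE_disjoint_noWrap _ _ _ _ _ _ (by unfold Mem.NoWrap; u_omega) (by unfold Mem.NoWrap; omega)
    (by right; rw [e]; u_omega)]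
  exact c.rb_same i hi

/-- **The head of loop 2152 again, after one round** (`++i`): COMMON by `common_frame`; the four slots of `At3` lie in the steady
part of the frame; the measure `ch − i` has decreased. -/
theorem at3_step {u₀ : State} {g : G} {v s : State} (he : Entered u₀ g) (hat : At3 u₀ g v) {i : Nat} (hi : i < g.ch)
    {ws : List Span}
    (hs : Mem.SameExcept ws v.mem s.mem) (hws : ∀ w, w ∈ ws → RoundWin g w) (hun : ShadowUntouched v.mem s.mem)
    (rip : s.rip = L.decode_residue.cut3) (rbx : s.reg .rbx = UInt64.ofNat (i + 1))
    (rbp : s.reg .rbp = g.e.reg .rsp - 8) (rsp : s.reg .rsp = g.e.reg .rsp - 248)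
    (r14 : s.reg .r14 = UInt64.ofNat g.ch) (r15 : s.reg .r15 = g.e.reg .r9)
    (code : CodeOK u₀ s.mem) (inv : abiInv s) :
    At3 u₀ g s ∧ g.ch - (s.reg .rbx).toNat < g.ch - (UInt64.ofNat i).toNat := by
  have hroom := he.room
  have h16 := ch_le16 he
  have eR : (g.e.reg .rsp).toNat = g.RA := rfl
  have hc := hat.common
  have hsl := slot_frame he hc hs hws
  constructor
  · refine ⟨rip, common_frame he hc hs hws hun rbp rsp code inv, ⟨i + 1, hi, rbx⟩, r14, r15, ?_, ?_, ?_, ?_⟩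
    · rw [hsl _ 8 (by u_omega) (by u_omega)]
      exact hat.sl_r
    · rw [hsl _ 4 (by u_omega) (by u_omega)]
      exact hat.sl_tap
    · rw [hsl _ 4 (by u_omega) (by u_omega)]
      exact hat.sl_n
    · rw [hsl _ 8 (by u_omega) (by u_omega)]
      exact hat.sl_dnd
  · rw [rbx, UInt64.toNat_ofNat', UInt64.toNat_ofNat']
    omega

/-- **COMMON at an exit of the segment**: the loop's exit path stores nothing. -/
theorem common_exit {u₀ : State} {g : G} {v s : State} (he : Entered u₀ g) (c : Common u₀ g v) (hm : s.mem = v.mem)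
    (rbp : s.reg .rbp = g.e.reg .rsp - 8) (rsp : s.reg .rsp = g.e.reg .rsp - 248)
    (code : CodeOK u₀ s.mem) (inv : abiInv s) : Common u₀ g s := by
  have hs : Mem.SameExcept [] v.mem s.mem := by
    rw [hm]
    exact Mem.SameExcept.refl _ _
  have hun : ShadowUntouched v.mem s.mem := by
    rw [hm]
    exact Mem.EqOn.refl _ _ _
  refine common_frame he c hs ?_ hun rbp rsp code inv
  intro w hw
  exact absurd hw List.not_mem_nil

/-- `temp_alloc_point`, loaded from its 4-byte slot into `r15d`, is the number itself. -/
theorem tap_word {u₀ : State} {g : G} {v : State} (hat : At3 u₀ g v) :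
    Word.ofBV (BitVec.ofNat 32 g.tap) = UInt64.ofNat g.tap := by
  have h := Mem.readLE_lt' v.mem (g.e.reg .rsp - 160) 4
  rw [hat.sl_tap] at h
  apply UInt64.toNat_inj.mp
  rw [toNat_ofBV32, BitVec.toNat_ofNat, UInt64.toNat_ofNat']
  omega

/-- **The dispatch `rtype == 2 && ch != 1`**, from the walker's form of `sete dl ; setne al ; test dl, al`. -/
theorem dispatch (rtype ch : Nat) (hr : rtype < 2 ^ 32) (hc : ch < 2 ^ 32) :
    (((if rtype % 4294967296 = 2 then 1 else 0 : BitVec 8) &&& (if ¬ch % 4294967296 = 1 then 1 else 0)).toNat = 0) ↔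
      (rtype ≠ 2 ∨ ch = 1) := by
  have e1 : rtype % 4294967296 = rtype := Nat.mod_eq_of_lt hr
  have e2 : ch % 4294967296 = ch := Nat.mod_eq_of_lt hc
  rw [e1, e2]
  by_cases h1 : rtype = 2 <;> by_cases h2 : ch = 1 <;> simp [h1, h2]

end Vorbis.Spec.decode_residue_2
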